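-- pv_equiv track=rewrite | github.com/Macthieu/toune-o-matic | toune_api.py | normalize_lsinfo
-- ===== SOURCE A (Python) =====
-- from typing import Any, Dict, List, Optional, Callable, Tuple
--
-- def normalize_lsinfo(raw: List[Dict[str, Any]]) -> List[Dict[str, Any]]:
--     """
--     MPD lsinfo retourne une liste d'objets hétérogènes:
--       - {"directory": "..."}
--       - {"file": "...", "Title": "...", "Artist": "...", "Album": "...", "Time": "..."}
--     On normalise en:
--       - {"type":"dir","path":"..."}
--       - {"type":"file","path":"...","title":...,"artist":...,"album":...,"duration":...}
--     """
--     items: List[Dict[str, Any]] = []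
--
--     for it in raw or []:
--         if "directory" in it:
--             items.append({"type": "dir", "path": it.get("directory", "")})
--             continue
--
--         if "file" in it:
--             duration = it.get("Time") or it.get("time") or ""
--             items.append({
--                 "type": "file",
--                 "path": it.get("file", ""),
--                 "title": it.get("Title") or it.get("title") or "",
--                 "artist": it.get("Artist") or it.get("artist") or "",
--                 "album": it.get("Album") or it.get("album") or "",
--                 "duration": str(duration),
--             })
--             continue
--
--     # tri: dossiers d'abord, puis fichiers; tri alpha sur path
--     items.sort(key=lambda x: (0 if x.get("type") == "dir" else 1, x.get("path", "")))
--     return items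
-- ===== SOURCE B (Python) =====
-- # B: partition into dirs/files during the pass, then two stable sorts by path and concatenate
-- # (equivalent to A's single composite-key sort because dirs always precede files in A's key).
-- def normalize_lsinfo(raw):
--     dirs = []
--     files = []
--     for it in raw or []:
--         if "directory" in it:
--             dirs.append({"type": "dir", "path": it.get("directory", "")})
--         elif "file" in it:
--             duration = it.get("Time") or it.get("time") or ""
--             files.append({
--                 "type": "file",
--                 "path": it.get("file", ""),
--                 "title": it.get("Title") or it.get("title") or "",
--                 "artist": it.get("Artist") or it.get("artist") or "",
--                 "album": it.get("Album") or it.get("album") or "",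
--                 "duration": str(duration),
--             })
--     dirs.sort(key=lambda x: x.get("path", ""))
--     files.sort(key=lambda x: x.get("path", ""))
--     return dirs + files
-- ===== Notes on version B (the rewrite author's own statement) =====
-- stated objective: alternative
-- what changed: B partitions entries into separate dirs/files lists during the normalization pass and replaces the single composite-key (type-rank, path) sort with two independent stable sorts by path, concatenated dirs-first.
import Mathlib
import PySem

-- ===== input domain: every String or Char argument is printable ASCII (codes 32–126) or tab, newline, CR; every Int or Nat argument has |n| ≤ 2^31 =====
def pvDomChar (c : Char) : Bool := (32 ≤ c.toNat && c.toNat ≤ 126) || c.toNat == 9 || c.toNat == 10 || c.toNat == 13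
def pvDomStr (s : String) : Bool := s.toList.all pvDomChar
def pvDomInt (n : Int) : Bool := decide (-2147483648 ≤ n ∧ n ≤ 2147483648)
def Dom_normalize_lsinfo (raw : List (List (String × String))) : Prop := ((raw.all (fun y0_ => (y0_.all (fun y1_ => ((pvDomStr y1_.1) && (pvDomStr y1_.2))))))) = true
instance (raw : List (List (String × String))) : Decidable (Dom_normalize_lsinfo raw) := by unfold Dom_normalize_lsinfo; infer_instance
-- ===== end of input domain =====

-- B partitions into dirs/files and sorts each by path (two stable sorts) instead of A's
-- single composite-key sort; the normalization of each entry is identical (shared helpers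
-- below correspond to identical Python source lines in Source A and Source B).

-- `v or next` for an optional string value: None and "" are falsy
def pvTruthy (o : Option String) : Option String :=
  match o with
  | some s => if s = "" then none else some s
  | none => none

-- {"type":"dir","path": it.get("directory","")}
def pvDirEntry (it : List (String × String)) : List (String × String) :=
  [("type", "dir"), ("path", PySem.Dict.getD (PySem.Dict.mk it) "directory" "")]

-- the file entry; str(duration) is the identity since the value is already a string
def pvFileEntry (it : List (String × String)) : List (String × String) :=
  let duration := ((pvTruthy (PySem.Dict.get? (PySem.Dict.mk it) "Time")).or (pvTruthy (PySem.Dict.get? (PySem.Dict.mk it) "time"))).getD ""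
  [("type", "file"),
   ("path", PySem.Dict.getD (PySem.Dict.mk it) "file" ""),
   ("title", ((pvTruthy (PySem.Dict.get? (PySem.Dict.mk it) "Title")).or (pvTruthy (PySem.Dict.get? (PySem.Dict.mk it) "title"))).getD ""),
   ("artist", ((pvTruthy (PySem.Dict.get? (PySem.Dict.mk it) "Artist")).or (pvTruthy (PySem.Dict.get? (PySem.Dict.mk it) "artist"))).getD ""),
   ("album", ((pvTruthy (PySem.Dict.get? (PySem.Dict.mk it) "Album")).or (pvTruthy (PySem.Dict.get? (PySem.Dict.mk it) "album"))).getD ""),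
   ("duration", duration)]

-- ===== PORT A =====
def normalize_lsinfo (raw : List (List (String × String))) : List (List (String × String)) :=
  let items := raw.foldl (fun items it =>
    if (PySem.Dict.get? (PySem.Dict.mk it) "directory").isSome then items ++ [pvDirEntry it]
    else if (PySem.Dict.get? (PySem.Dict.mk it) "file").isSome then items ++ [pvFileEntry it]
    else items) []
  PySem.List.sorted2 items
    (fun x => if PySem.Dict.get? (PySem.Dict.mk x) "type" == some "dir" then (0 : Int) else 1)
    (fun x => PySem.Dict.getD (PySem.Dict.mk x) "path" "")

-- ===== PORT B =====
def normalize_lsinfo_alt (raw : List (List (String × String))) : List (List (String × String)) :=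
  let df := raw.foldl (fun (df : List (List (String × String)) × List (List (String × String))) it =>
    if (PySem.Dict.get? (PySem.Dict.mk it) "directory").isSome then (df.1 ++ [pvDirEntry it], df.2)
    else if (PySem.Dict.get? (PySem.Dict.mk it) "file").isSome then (df.1, df.2 ++ [pvFileEntry it])
    else df) ([], [])
  PySem.List.sorted df.1 (fun x => PySem.Dict.getD (PySem.Dict.mk x) "path" "") ++
  PySem.List.sorted df.2 (fun x => PySem.Dict.getD (PySem.Dict.mk x) "path" "")

-- ===== PRECONDITION & SPEC =====
def Spec_normalize_lsinfo (raw : List (List (String × String))) (out : List (List (String × String))) : Prop := out = normalize_lsinfo_alt raw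
instance (raw : List (List (String × String))) (out : List (List (String × String))) : Decidable (Spec_normalize_lsinfo raw out) := by unfold Spec_normalize_lsinfo; infer_instance

-- ===== CLAIM (what is proved, stated in full; the proofs are below) =====
def Claim_equal_normalize_lsinfo : Prop := ∀ (raw : List (List (String × String))), Dom_normalize_lsinfo raw → Spec_normalize_lsinfo raw (normalize_lsinfo raw)

-- ===== LEMMAS AND PROOFS =====

-- abbreviations used only by the proofs
def pvIsDir (x : List (String × String)) : Bool := PySem.Dict.get? (PySem.Dict.mk x) "type" == some "dir"
def pvK2 (x : List (String × String)) : String := PySem.Dict.getD (PySem.Dict.mk x) "path" ""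
def pvB2 (a b : List (String × String)) : Bool :=
  decide ((if pvIsDir a then (0 : Int) else 1) < (if pvIsDir b then (0 : Int) else 1)) ||
  (!decide ((if pvIsDir b then (0 : Int) else 1) < (if pvIsDir a then (0 : Int) else 1)) &&
    decide (pvK2 a < pvK2 b))
def pvBk (a b : List (String × String)) : Bool := decide (pvK2 a < pvK2 b)

lemma pvB2_dir_dir {a b} (ha : pvIsDir a = true) (hb : pvIsDir b = true) : pvB2 a b = pvBk a b := by
  simp [pvB2, pvBk, ha, hb]
lemma pvB2_dir_file {a b} (ha : pvIsDir a = true) (hb : pvIsDir b = false) : pvB2 a b = true := by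
  simp [pvB2, ha, hb]
lemma pvB2_file_dir {a b} (ha : pvIsDir a = false) (hb : pvIsDir b = true) : pvB2 a b = false := by
  simp [pvB2, ha, hb]
lemma pvB2_file_file {a b} (ha : pvIsDir a = false) (hb : pvIsDir b = false) : pvB2 a b = pvBk a b := by
  simp [pvB2, pvBk, ha, hb]

lemma pv_ins_dir (x : List (String × String)) (hx : pvIsDir x = true) :
    ∀ (d f : List (List (String × String))), (∀ y ∈ d, pvIsDir y = true) → (∀ y ∈ f, pvIsDir y = false) →
    PySem.List.insertBy pvB2 x (d ++ f) = PySem.List.insertBy pvBk x d ++ f := by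
  intro d
  induction d with
  | nil =>
    intro f _ hf
    cases f with
    | nil => simp [PySem.List.insertBy]
    | cons g gs =>
      simp only [List.nil_append, PySem.List.insertBy]
      rw [pvB2_dir_file hx (hf g (by simp))]
      simp
  | cons y d ih =>
    intro f hd hf
    have hy : pvIsDir y = true := hd y (by simp)
    simp only [List.cons_append, PySem.List.insertBy]
    rw [pvB2_dir_dir hx hy]
    by_cases h : pvBk x y = true
    · simp [h]
    · simp only [Bool.not_eq_true] at h
      simp [h, ih f (fun z hz => hd z (by simp [hz])) hf]

lemma pv_ins_file (x : List (String × String)) (hx : pvIsDir x = false) :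
    ∀ (d f : List (List (String × String))), (∀ y ∈ d, pvIsDir y = true) → (∀ y ∈ f, pvIsDir y = false) →
    PySem.List.insertBy pvB2 x (d ++ f) = d ++ PySem.List.insertBy pvBk x f := by
  intro d
  induction d with
  | nil =>
    intro f _ hf
    simp only [List.nil_append]
    induction f with
    | nil => rfl
    | cons g gs ihf =>
      simp only [PySem.List.insertBy]
      rw [pvB2_file_file hx (hf g (by simp))]
      by_cases h : pvBk x g = true
      · simp [h]
      · simp only [Bool.not_eq_true] at h
        simp [h, ihf (fun z hz => hf z (by simp [hz]))]
  | cons y d ih =>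
    intro f hd hf
    have hy : pvIsDir y = true := hd y (by simp)
    simp only [List.cons_append, PySem.List.insertBy]
    rw [pvB2_file_dir hx hy]
    simp [ih f (fun z hz => hd z (by simp [hz])) hf]

lemma pv_mem_insertBy_pred {p : List (String × String) → Bool} {b : List (String × String) → List (String × String) → Bool}
    {x : List (String × String)} {l : List (List (String × String))}
    (hx : p x = true) (hl : ∀ y ∈ l, p y = true) :
    ∀ y ∈ PySem.List.insertBy b x l, p y = true := by
  intro y hy
  rcases (PySem.List.mem_insertBy _ _ _ _).1 hy with h | h
  · exact h ▸ hx
  · exact hl y h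

lemma pv_split_sort :
    ∀ (xs d f : List (List (String × String))), (∀ y ∈ d, pvIsDir y = true) → (∀ y ∈ f, pvIsDir y = false) →
    xs.foldl (fun acc x => PySem.List.insertBy pvB2 x acc) (d ++ f)
      = (xs.filter pvIsDir).foldl (fun acc x => PySem.List.insertBy pvBk x acc) d
        ++ (xs.filter (fun x => !pvIsDir x)).foldl (fun acc x => PySem.List.insertBy pvBk x acc) f := by
  intro xs
  induction xs with
  | nil => intro d f _ _; simp
  | cons x xs ih =>
    intro d f hd hf
    by_cases hx : pvIsDir x = true
    · simp only [List.foldl_cons, List.filter_cons, hx, Bool.not_true]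
      rw [if_pos trivial, if_neg (by simp)]
      rw [pv_ins_dir x hx d f hd hf]
      exact ih _ f (pv_mem_insertBy_pred hx hd) hf
    · simp only [Bool.not_eq_true] at hx
      simp only [List.foldl_cons, List.filter_cons, hx, Bool.not_false]
      rw [if_neg (by simp), if_pos trivial]
      rw [pv_ins_file x hx d f hd hf]
      refine ih d _ hd ?_
      intro y hy
      rcases (PySem.List.mem_insertBy _ _ _ _).1 hy with h | h
      · exact h ▸ hx
      · exact hf y h

-- per-entry normalization as a flatMap
def pvG (it : List (String × String)) : List (List (String × String)) :=
  if (PySem.Dict.get? (PySem.Dict.mk it) "directory").isSome then [pvDirEntry it]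
  else if (PySem.Dict.get? (PySem.Dict.mk it) "file").isSome then [pvFileEntry it]
  else []
def pvGd (it : List (String × String)) : List (List (String × String)) :=
  if (PySem.Dict.get? (PySem.Dict.mk it) "directory").isSome then [pvDirEntry it] else []
def pvGf (it : List (String × String)) : List (List (String × String)) :=
  if (PySem.Dict.get? (PySem.Dict.mk it) "directory").isSome then []
  else if (PySem.Dict.get? (PySem.Dict.mk it) "file").isSome then [pvFileEntry it] else []

lemma pvIsDir_dirEntry (it : List (String × String)) : pvIsDir (pvDirEntry it) = true := by
  simp [pvIsDir, pvDirEntry, PySem.Dict.get?]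
lemma pvIsDir_fileEntry (it : List (String × String)) : pvIsDir (pvFileEntry it) = false := by
  simp [pvIsDir, pvFileEntry, PySem.Dict.get?]

lemma pv_loopA (raw : List (List (String × String))) :
    ∀ init, raw.foldl (fun items it =>
      if (PySem.Dict.get? (PySem.Dict.mk it) "directory").isSome then items ++ [pvDirEntry it]
      else if (PySem.Dict.get? (PySem.Dict.mk it) "file").isSome then items ++ [pvFileEntry it]
      else items) init = init ++ raw.flatMap pvG := by
  induction raw with
  | nil => intro init; simp
  | cons it raw ih =>
    intro init
    simp only [List.foldl_cons, List.flatMap_cons, ih, pvG]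
    split_ifs <;> simp

lemma pv_loopB (raw : List (List (String × String))) :
    ∀ (init : List (List (String × String)) × List (List (String × String))),
    raw.foldl (fun df it =>
      if (PySem.Dict.get? (PySem.Dict.mk it) "directory").isSome then (df.1 ++ [pvDirEntry it], df.2)
      else if (PySem.Dict.get? (PySem.Dict.mk it) "file").isSome then (df.1, df.2 ++ [pvFileEntry it])
      else df) init = (init.1 ++ raw.flatMap pvGd, init.2 ++ raw.flatMap pvGf) := by
  induction raw with
  | nil => intro init; simp
  | cons it raw ih =>
    intro init
    simp only [List.foldl_cons, List.flatMap_cons, ih, pvGd, pvGf]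
    split_ifs <;> simp

lemma pv_filter_dir (raw : List (List (String × String))) :
    (raw.flatMap pvG).filter pvIsDir = raw.flatMap pvGd := by
  induction raw with
  | nil => rfl
  | cons it raw ih =>
    simp only [List.flatMap_cons, List.filter_append, ih]
    congr 1
    simp only [pvG, pvGd]
    split_ifs <;> simp [pvIsDir_dirEntry, pvIsDir_fileEntry]

lemma pv_filter_file (raw : List (List (String × String))) :
    (raw.flatMap pvG).filter (fun x => !pvIsDir x) = raw.flatMap pvGf := by
  induction raw with
  | nil => rfl
  | cons it raw ih =>
    simp only [List.flatMap_cons, List.filter_append, ih]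
    congr 1
    simp only [pvG, pvGf]
    split_ifs <;> simp [pvIsDir_dirEntry, pvIsDir_fileEntry]

-- ===== VERDICT (by name: the statement is the Claim_ definition above) =====
theorem normalize_lsinfo_spec : Claim_equal_normalize_lsinfo := by
  intro raw _
  unfold Spec_normalize_lsinfo normalize_lsinfo normalize_lsinfo_alt
  rw [pv_loopA raw [], pv_loopB raw ([], [])]
  simp only [List.nil_append]
  have h2 : PySem.List.sorted2 (raw.flatMap pvG)
      (fun x => if PySem.Dict.get? (PySem.Dict.mk x) "type" == some "dir" then (0 : Int) else 1)
      (fun x => PySem.Dict.getD (PySem.Dict.mk x) "path" "")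
    = (raw.flatMap pvG).foldl (fun acc x => PySem.List.insertBy pvB2 x acc) [] := rfl
  have hk : PySem.List.sorted (raw.flatMap pvGd) (fun x => PySem.Dict.getD (PySem.Dict.mk x) "path" "")
    = (raw.flatMap pvGd).foldl (fun acc x => PySem.List.insertBy pvBk x acc) [] := rfl
  have hk2 : PySem.List.sorted (raw.flatMap pvGf) (fun x => PySem.Dict.getD (PySem.Dict.mk x) "path" "")
    = (raw.flatMap pvGf).foldl (fun acc x => PySem.List.insertBy pvBk x acc) [] := rfl
  rw [h2, hk, hk2, ← pv_filter_dir, ← pv_filter_file]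
  simpa using pv_split_sort (raw.flatMap pvG) [] [] (by simp) (by simp)
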